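-- pv_equiv track=rewrite | github.com/ChoSangHyeon/algoisthm | test/더맵게.py | solution
-- ===== SOURCE A (Python) =====
-- import heapq
--
-- def solution(scoville, K):
--     heap = []
--     cnt = 0
--     for i in scoville:
--         heapq.heappush(heap,i)
--     while heap[0] < K:
--         if len(heap) == 1:
--             cnt = -1
--             break
--         a = heapq.heappop(heap)
--         b = heapq.heappop(heap)
--         heapq.heappush(heap,a+b*2)
--         cnt += 1
--     return cnt
-- ===== SOURCE B (Python) =====
-- import bisect
--
-- def _peek(base, i, made):
--     # smallest remaining value: the smaller of the heads of the two sorted queues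
--     if made and (i >= len(base) or made[0] <= base[i]):
--         return made[0]
--     return base[i]
--
-- def _pop(base, i, made):
--     # remove the smallest remaining value; returns (value, new pointer)
--     if made and (i >= len(base) or made[0] <= base[i]):
--         return made.pop(0), i
--     return base[i], i + 1
--
-- def solution(scoville, K):
--     # Two-queue scheme (Huffman-style): sort once, consume the original values
--     # left-to-right with a pointer, keep the mixed values in a second sorted queue;
--     # the global minimum is always one of the two queue heads.
--     base = sorted(scoville)
--     made = []          # mixed values
--     n = len(base)
--     i = 0              # base[i:] are the not-yet-consumed original values
--     cnt = 0
--     while _peek(base, i, made) < K: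
--         if n - i + len(made) == 1:
--             return -1
--         a, i = _pop(base, i, made)
--         b, i = _pop(base, i, made)
--         bisect.insort(made, a + 2 * b)
--         cnt += 1
--     return cnt
-- ===== Notes on version B (the rewrite author's own statement) =====
-- stated objective: alternative
-- what changed: Replaces A's single binary heap (heapq sift-up/sift-down) by the Huffman-style two-queue scheme: sort once, then merge-consume the static sorted input via a pointer against a second queue of mixed values, the minimum always being one of the two queue heads.
-- outside the precondition, e.g. on solution([], 5): A raises IndexError, B raises IndexError
import Mathlib
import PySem

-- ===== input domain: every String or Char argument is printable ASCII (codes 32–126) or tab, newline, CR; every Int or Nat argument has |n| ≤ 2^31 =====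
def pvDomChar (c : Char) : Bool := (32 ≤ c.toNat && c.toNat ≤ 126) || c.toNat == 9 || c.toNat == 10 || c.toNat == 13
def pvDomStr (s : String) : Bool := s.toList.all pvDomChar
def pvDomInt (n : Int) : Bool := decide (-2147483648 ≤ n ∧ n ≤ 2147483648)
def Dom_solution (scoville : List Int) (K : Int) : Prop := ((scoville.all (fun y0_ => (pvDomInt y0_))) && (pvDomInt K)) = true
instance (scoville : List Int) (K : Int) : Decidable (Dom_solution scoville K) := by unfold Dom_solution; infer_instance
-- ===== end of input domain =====

-- B replaces A's single binary heap (heapq's sift-up/sift-down array algorithm) by the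
-- Huffman-style two-queue scheme: one initial sort, a pointer consuming the static sorted
-- input, and a second queue of mixed values; equivalence of the return value is proved on
-- nonempty inputs (A and B both raise IndexError on an empty list).

-- ===== PORT A =====

-- heapq._siftdown(heap, startpos, pos) with newitem = heap[pos]: bubble newitem up.
-- (fuel is a pure totality guard: pos strictly decreases, so fuel = initial pos always suffices)
def pySiftdownF (fuel : Nat) (heap : List Int) (startpos pos : Nat) (newitem : Int) : List Int :=
  match fuel with
  | 0 => heap.set pos newitem
  | fuel + 1 =>
    if startpos < pos then
      let parentpos := (pos - 1) / 2
      let parent := heap.getD parentpos 0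
      if newitem < parent then
        pySiftdownF fuel (heap.set pos parent) startpos parentpos newitem
      else
        heap.set pos newitem
    else
      heap.set pos newitem

def pySiftdown (heap : List Int) (startpos pos : Nat) (newitem : Int) : List Int :=
  pySiftdownF pos heap startpos pos newitem

-- heapq._siftup(heap, pos) with newitem = heap[pos]: move the hole down along the
-- smaller-child path to a leaf, then bubble newitem up from there.
-- (Python writes heap[pos] = newitem just before _siftdown, which immediately overwrites
-- that slot again; pySiftdown receives newitem directly — the final list is identical.
-- fuel is a pure totality guard: the hole index strictly increases towards endpos.)
def pySiftupF (fuel : Nat) (heap : List Int) (endpos pos : Nat) (newitem : Int) : List Int :=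
  match fuel with
  | 0 => pySiftdown heap 0 pos newitem
  | fuel + 1 =>
    if 2 * pos + 1 < endpos then
      let childpos := if 2 * pos + 2 < endpos ∧ ¬ heap.getD (2 * pos + 1) 0 < heap.getD (2 * pos + 2) 0
                      then 2 * pos + 2 else 2 * pos + 1
      pySiftupF fuel (heap.set pos (heap.getD childpos 0)) endpos childpos newitem
    else
      pySiftdown heap 0 pos newitem

def pySiftup (heap : List Int) (endpos pos : Nat) (newitem : Int) : List Int :=
  pySiftupF endpos heap endpos pos newitem

-- heapq.heappush
def pyHeappush (heap : List Int) (item : Int) : List Int :=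
  pySiftdown (heap ++ [item]) 0 heap.length item

-- heapq.heappop: returns (popped minimum, remaining heap).
-- On an empty heap Python raises IndexError (excluded by Pre_solution via scoville ≠ []).
def pyHeappop (heap : List Int) : Int × List Int :=
  let lastelt := heap.getD (heap.length - 1) 0
  let rest := heap.dropLast
  if rest.isEmpty then (lastelt, rest)
  else (rest.getD 0 0, pySiftup (rest.set 0 lastelt) rest.length 0 lastelt)

-- the while-loop of A ('while heap[0] < K'); each iteration shrinks the heap by one,
-- so fuel = initial heap size is a pure totality guard
def solutionLoopF (fuel : Nat) (K : Int) (heap : List Int) (cnt : Int) : Int :=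
  match fuel with
  | 0 => cnt
  | fuel + 1 =>
    if heap.getD 0 0 < K then
      if heap.length = 1 then -1
      else
        let a := pyHeappop heap
        let b := pyHeappop a.2
        solutionLoopF fuel K (pyHeappush b.2 (a.1 + b.1 * 2)) (cnt + 1)
    else cnt

def solutionLoop (K : Int) (heap : List Int) (cnt : Int) : Int :=
  solutionLoopF heap.length K heap cnt

def solution (scoville : List Int) (K : Int) : Int :=
  solutionLoop K (scoville.foldl (fun heap i => pyHeappush heap i) []) 0

-- ===== PORT B =====

-- bisect.insort(lst, x): insert x after existing entries equal to it
def pyInsort (lst : List Int) (x : Int) : List Int :=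
  lst.take (PySem.List.bisectRight lst x) ++ x :: lst.drop (PySem.List.bisectRight lst x)

-- _peek(base, i, made): the smaller of the heads of the two sorted queues
def tqPeek (base : List Int) (i : Nat) (made : List Int) : Int :=
  if made ≠ [] ∧ (base.length ≤ i ∨ made.getD 0 0 ≤ base.getD i 0)
  then made.getD 0 0 else base.getD i 0

-- _pop(base, i, made): remove the smallest remaining value; returns (value, new i, new made)
-- (Python's made.pop(0) mutates made; the popped queue is returned here instead)
def tqPop (base : List Int) (i : Nat) (made : List Int) : Int × Nat × List Int :=
  if made ≠ [] ∧ (base.length ≤ i ∨ made.getD 0 0 ≤ base.getD i 0)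
  then (made.getD 0 0, i, made.tail)
  else (base.getD i 0, i + 1, made)

-- the while-loop of B; each iteration shrinks the total n - i + |made| by one,
-- so fuel = n (the initial total) is a pure totality guard
def solutionAltLoopF (fuel : Nat) (K : Int) (base : List Int) (i : Nat) (made : List Int) (cnt : Int) : Int :=
  match fuel with
  | 0 => cnt
  | fuel + 1 =>
    if tqPeek base i made < K then
      if base.length - i + made.length = 1 then -1
      else
        let p := tqPop base i made
        let q := tqPop base p.2.1 p.2.2
        solutionAltLoopF fuel K base q.2.1 (pyInsort q.2.2 (p.1 + 2 * q.1)) (cnt + 1)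
    else cnt

def solution_alt (scoville : List Int) (K : Int) : Int :=
  solutionAltLoopF scoville.length K (PySem.List.sorted scoville (fun x => x) false) 0 [] 0

-- ===== PRECONDITION & SPEC =====
-- Pre_ excludes only the empty list, on which A raises IndexError at 'heap[0]' (B raises too).
def Pre_solution (scoville : List Int) (_K : Int) : Prop := scoville ≠ []
instance (scoville : List Int) (K : Int) : Decidable (Pre_solution scoville K) := by
  unfold Pre_solution; infer_instance

def pvWitness_solution : List Int × Int := ([1, 2, 3, 9, 10, 12], 7)

def Spec_solution (scoville : List Int) (K : Int) (out : Int) : Prop := out = solution_alt scoville K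
instance (scoville : List Int) (K : Int) (out : Int) : Decidable (Spec_solution scoville K out) := by
  unfold Spec_solution; infer_instance

-- ===== CLAIM (what is proved, stated in full; the proofs are below) =====
def Claim_equal_solution : Prop := ∀ (scoville : List Int) (K : Int), Dom_solution scoville K → Pre_solution scoville K → Spec_solution scoville K (solution scoville K)

-- ===== LEMMAS AND PROOFS =====

-- proof-only intermediate: the combine-two-smallest loop over ONE sorted list;
-- A's heap loop and B's two-queue loop are each proved equal to it
def listLoopF (fuel : Nat) (K : Int) (lst : List Int) (cnt : Int) : Int :=
  match fuel with
  | 0 => cnt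
  | fuel + 1 =>
    if lst.getD 0 0 < K then
      if lst.length = 1 then -1
      else
        let a := lst.getD 0 0
        let b := lst.getD 1 0
        listLoopF fuel K (pyInsort (lst.drop 2) (a + 2 * b)) (cnt + 1)
    else cnt

theorem length_pySiftdownF (f : Nat) (heap : List Int) (sp p : Nat) (x : Int) :
    (pySiftdownF f heap sp p x).length = heap.length := by
  fun_induction pySiftdownF <;> simp_all

theorem length_pySiftdown (heap : List Int) (s p : Nat) (x : Int) :
    (pySiftdown heap s p x).length = heap.length := by
  unfold pySiftdown; exact length_pySiftdownF _ _ _ _ _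

theorem length_pySiftupF (f : Nat) (heap : List Int) (e p : Nat) (x : Int) :
    (pySiftupF f heap e p x).length = heap.length := by
  fun_induction pySiftupF <;> simp_all [length_pySiftdown]

theorem length_pySiftup (heap : List Int) (e p : Nat) (x : Int) :
    (pySiftup heap e p x).length = heap.length := by
  unfold pySiftup; exact length_pySiftupF _ _ _ _ _

theorem length_pyHeappop_snd (heap : List Int) :
    (pyHeappop heap).2.length = heap.length - 1 := by
  simp only [pyHeappop]
  split <;> simp [length_pySiftup]

theorem length_pyHeappush (heap : List Int) (x : Int) :
    (pyHeappush heap x).length = heap.length + 1 := by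
  simp [pyHeappush, length_pySiftdown]

-- the binary-heap invariant of heapq: every non-root entry is ≥ its parent
def IsHeap (h : List Int) : Prop :=
  ∀ j, 0 < j → j < h.length → h.getD ((j - 1) / 2) 0 ≤ h.getD j 0

theorem getD_set_self (l : List Int) {i : Nat} (hi : i < l.length) (v : Int) :
    (l.set i v).getD i 0 = v := by
  rw [List.getD_eq_getElem _ _ (by simpa using hi), List.getElem_set]
  simp

theorem getD_set_ne (l : List Int) {i j : Nat} (hne : i ≠ j) (v : Int) :
    (l.set i v).getD j 0 = l.getD j 0 := by
  simp [List.getD, hne]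

theorem root_min (h : List Int) (hh : IsHeap h) :
    ∀ j, j < h.length → h.getD 0 0 ≤ h.getD j 0 := by
  intro j
  induction j using Nat.strong_induction_on with
  | _ j ih =>
    intro hj
    rcases Nat.eq_zero_or_pos j with h0 | h0
    · subst h0; exact le_refl _
    · exact le_trans (ih ((j - 1) / 2) (by omega) (by omega)) (hh j h0 hj)

-- multiset bookkeeping for List.set
theorem multiset_set (l : List Int) (i : Nat) (hi : i < l.length) (v : Int) :
    (l.getD i 0) ::ₘ ((l.set i v : List Int) : Multiset Int) = v ::ₘ (l : Multiset Int) := by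
  induction l generalizing i with
  | nil => simp at hi
  | cons a t ih =>
    cases i with
    | zero =>
      show a ::ₘ (v ::ₘ (t : Multiset Int)) = v ::ₘ (a ::ₘ (t : Multiset Int))
      exact Multiset.cons_swap a v t
    | succ i =>
      show (t.getD i 0) ::ₘ (a ::ₘ ((t.set i v : List Int) : Multiset Int))
          = v ::ₘ (a ::ₘ (t : Multiset Int))
      rw [Multiset.cons_swap, ih i (by simpa using hi), Multiset.cons_swap]

-- pySiftdown called with startpos = 0 from a state whose only disorder is the hole at pos
theorem pySiftdownF_spec (fuel : Nat) : ∀ (pos : Nat) (heap : List Int) (newitem : Int),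
    pos ≤ fuel → pos < heap.length →
    (∀ j, 0 < j → j < heap.length → j ≠ pos → (j - 1) / 2 ≠ pos →
      heap.getD ((j - 1) / 2) 0 ≤ heap.getD j 0) →
    (∀ j, 0 < j → j < heap.length → (j - 1) / 2 = pos → 0 < pos →
      heap.getD ((pos - 1) / 2) 0 ≤ heap.getD j 0) →
    (∀ j, 0 < j → j < heap.length → (j - 1) / 2 = pos →
      newitem ≤ heap.getD j 0) →
    IsHeap (pySiftdownF fuel heap 0 pos newitem) ∧
      (heap.getD pos 0) ::ₘ ((pySiftdownF fuel heap 0 pos newitem : List Int) : Multiset Int)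
        = newitem ::ₘ (heap : Multiset Int) := by
  induction fuel with
  | zero =>
    intro pos heap newitem hf hlen inv1 inv2 inv3
    have hpos0 : pos = 0 := by omega
    subst hpos0
    simp only [pySiftdownF]
    refine ⟨?_, multiset_set heap 0 hlen newitem⟩
    intro j hj0 hjlen
    simp only [List.length_set] at hjlen
    have hj : j ≠ 0 := by omega
    rw [getD_set_ne _ (fun h => hj h.symm)]
    by_cases hq : (j - 1) / 2 = 0
    · rw [hq, getD_set_self _ hlen]
      exact inv3 j hj0 hjlen hq
    · rw [getD_set_ne _ (fun h => hq h.symm)]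
      exact inv1 j hj0 hjlen hj hq
  | succ fuel ih =>
    intro pos heap newitem hf hlen inv1 inv2 inv3
    simp only [pySiftdownF]
    by_cases hpos : 0 < pos
    · simp only [if_pos hpos]
      by_cases hlt : newitem < heap.getD ((pos - 1) / 2) 0
      · simp only [if_pos hlt]
        have hpp : (pos - 1) / 2 < pos := by omega
        have hpplen : (pos - 1) / 2 < heap.length := by omega
        obtain ⟨ihh, ihms⟩ := ih ((pos - 1) / 2)
          (heap.set pos (heap.getD ((pos - 1) / 2) 0)) newitem (by omega)
          (by simpa using hpplen)
          (by -- inv1 for the shifted state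
            intro j hj0 hjlen hjne hqne
            simp only [List.length_set] at hjlen
            have hjpos : j ≠ pos := by
              intro h; apply hqne; omega
            rw [getD_set_ne _ (fun h => hjpos h.symm)]
            by_cases hq : (j - 1) / 2 = pos
            · rw [hq, getD_set_self _ hlen]
              exact inv2 j hj0 hjlen hq hpos
            · rw [getD_set_ne _ (fun h => hq h.symm)]
              exact inv1 j hj0 hjlen hjpos hq)
          (by -- inv2 for the shifted state
            intro j hj0 hjlen hq hpp0
            simp only [List.length_set] at hjlen
            have hppp : ((pos - 1) / 2 - 1) / 2 ≠ pos := by omega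
            rw [getD_set_ne _ (fun h => hppp h.symm)]
            have hbase : heap.getD (((pos - 1) / 2 - 1) / 2) 0 ≤ heap.getD ((pos - 1) / 2) 0 :=
              inv1 ((pos - 1) / 2) hpp0 hpplen (by omega) (by omega)
            by_cases hj : j = pos
            · subst hj; rw [getD_set_self _ hlen]; exact hbase
            · rw [getD_set_ne _ (fun h => hj h.symm)]
              have h2 := inv1 j hj0 hjlen hj (by omega)
              rw [hq] at h2
              exact le_trans hbase h2)
          (by -- inv3 for the shifted state
            intro j hj0 hjlen hq
            simp only [List.length_set] at hjlen
            by_cases hj : j = pos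
            · subst hj; rw [getD_set_self _ hlen]; exact le_of_lt hlt
            · rw [getD_set_ne _ (fun h => hj h.symm)]
              have h2 := inv1 j hj0 hjlen hj (by omega)
              rw [hq] at h2
              exact le_of_lt (lt_of_lt_of_le hlt h2))
        refine ⟨ihh, ?_⟩
        have hset : (heap.set pos (heap.getD ((pos - 1) / 2) 0)).getD ((pos - 1) / 2) 0
            = heap.getD ((pos - 1) / 2) 0 := getD_set_ne _ (by omega) _
        rw [hset] at ihms
        have hms2 := multiset_set heap pos hlen (heap.getD ((pos - 1) / 2) 0)
        have : heap.getD ((pos - 1) / 2) 0 ::ₘ (heap.getD pos 0 ::ₘ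
            ((pySiftdownF fuel (heap.set pos (heap.getD ((pos - 1) / 2) 0)) 0 ((pos - 1) / 2) newitem : List Int) : Multiset Int))
            = heap.getD ((pos - 1) / 2) 0 ::ₘ (newitem ::ₘ (heap : Multiset Int)) := by
          rw [Multiset.cons_swap, ihms, Multiset.cons_swap _ newitem, hms2,
            Multiset.cons_swap]
        exact (Multiset.cons_inj_right _).1 this
      · simp only [if_neg hlt]
        refine ⟨?_, multiset_set heap pos hlen newitem⟩
        intro j hj0 hjlen
        simp only [List.length_set] at hjlen
        by_cases hj : j = pos
        · subst hj
          rw [getD_set_self _ hlen, getD_set_ne _ (by omega)]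
          exact le_of_not_gt hlt
        · rw [getD_set_ne _ (fun h => hj h.symm)]
          by_cases hq : (j - 1) / 2 = pos
          · rw [hq, getD_set_self _ hlen]
            exact inv3 j hj0 hjlen hq
          · rw [getD_set_ne _ (fun h => hq h.symm)]
            exact inv1 j hj0 hjlen hj hq
    · simp only [if_neg hpos]
      have hpos0 : pos = 0 := by omega
      subst hpos0
      refine ⟨?_, multiset_set heap 0 hlen newitem⟩
      intro j hj0 hjlen
      simp only [List.length_set] at hjlen
      have hj : j ≠ 0 := by omega
      rw [getD_set_ne _ (fun h => hj h.symm)]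
      by_cases hq : (j - 1) / 2 = 0
      · rw [hq, getD_set_self _ hlen]
        exact inv3 j hj0 hjlen hq
      · rw [getD_set_ne _ (fun h => hq h.symm)]
        exact inv1 j hj0 hjlen hj hq


theorem pySiftdown_spec (pos : Nat) (heap : List Int) (newitem : Int)
    (hlen : pos < heap.length)
    (inv1 : ∀ j, 0 < j → j < heap.length → j ≠ pos → (j - 1) / 2 ≠ pos →
      heap.getD ((j - 1) / 2) 0 ≤ heap.getD j 0)
    (inv2 : ∀ j, 0 < j → j < heap.length → (j - 1) / 2 = pos → 0 < pos →
      heap.getD ((pos - 1) / 2) 0 ≤ heap.getD j 0)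
    (inv3 : ∀ j, 0 < j → j < heap.length → (j - 1) / 2 = pos →
      newitem ≤ heap.getD j 0) :
    IsHeap (pySiftdown heap 0 pos newitem) ∧
      (heap.getD pos 0) ::ₘ ((pySiftdown heap 0 pos newitem : List Int) : Multiset Int)
        = newitem ::ₘ (heap : Multiset Int) := by
  unfold pySiftdown
  exact pySiftdownF_spec pos pos heap newitem (le_refl pos) hlen inv1 inv2 inv3

theorem pySiftup_spec (pos : Nat) (heap : List Int) (newitem : Int)
    (hlen : pos < heap.length)
    (inv1 : ∀ j, 0 < j → j < heap.length → j ≠ pos → (j - 1) / 2 ≠ pos →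
      heap.getD ((j - 1) / 2) 0 ≤ heap.getD j 0)
    (inv2 : ∀ j, 0 < j → j < heap.length → (j - 1) / 2 = pos → 0 < pos →
      heap.getD ((pos - 1) / 2) 0 ≤ heap.getD j 0) :
    IsHeap (pySiftup heap heap.length pos newitem) ∧
      (heap.getD pos 0) ::ₘ ((pySiftup heap heap.length pos newitem : List Int) : Multiset Int)
        = newitem ::ₘ (heap : Multiset Int) := by
  have aux : ∀ (n pos : Nat) (heap : List Int) (newitem : Int), heap.length - pos ≤ n →
      pos < heap.length →
      (∀ j, 0 < j → j < heap.length → j ≠ pos → (j - 1) / 2 ≠ pos →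
        heap.getD ((j - 1) / 2) 0 ≤ heap.getD j 0) →
      (∀ j, 0 < j → j < heap.length → (j - 1) / 2 = pos → 0 < pos →
        heap.getD ((pos - 1) / 2) 0 ≤ heap.getD j 0) →
      IsHeap (pySiftupF n heap heap.length pos newitem) ∧
        (heap.getD pos 0) ::ₘ ((pySiftupF n heap heap.length pos newitem : List Int) : Multiset Int)
          = newitem ::ₘ (heap : Multiset Int) := by
    intro n
    induction n with
    | zero => intro pos heap newitem hn hlen _ _; omega
    | succ n ihn =>
      intro pos heap newitem hn hlen inv1 inv2
      simp only [pySiftupF]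
      by_cases hc : 2 * pos + 1 < heap.length
      · simp only [if_pos hc]
        have key : ∀ c, pos < c → c < heap.length → (c - 1) / 2 = pos →
            (∀ o, 0 < o → (o - 1) / 2 = pos → o < heap.length →
              heap.getD c 0 ≤ heap.getD o 0) →
            IsHeap (pySiftupF n (heap.set pos (heap.getD c 0)) heap.length c newitem) ∧
              (heap.getD pos 0) ::ₘ
                ((pySiftupF n (heap.set pos (heap.getD c 0)) heap.length c newitem : List Int) : Multiset Int)
                = newitem ::ₘ (heap : Multiset Int) := by
          intro c hpc hclen hcpar hcmin
          obtain ⟨ihh, ihms⟩ := ihn c (heap.set pos (heap.getD c 0)) newitem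
            (by simp only [List.length_set]; omega)
            (by simpa using hclen)
            (by
              intro j hj0 hjlen hjc hqc
              simp only [List.length_set] at hjlen
              by_cases hj : j = pos
              · subst hj
                rw [getD_set_ne _ (by omega), getD_set_self _ hlen]
                exact inv2 c (by omega) hclen hcpar hj0
              · rw [getD_set_ne _ (fun h => hj h.symm)]
                by_cases hq : (j - 1) / 2 = pos
                · rw [hq, getD_set_self _ hlen]
                  exact hcmin j hj0 hq hjlen
                · rw [getD_set_ne _ (fun h => hq h.symm)]
                  exact inv1 j hj0 hjlen hj hq)
            (by
              intro j hj0 hjlen hq hc0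
              simp only [List.length_set] at hjlen
              rw [hcpar, getD_set_self _ hlen,
                getD_set_ne _ (by omega : pos ≠ j)]
              have h2 := inv1 j hj0 hjlen (by omega) (by omega)
              rw [hq] at h2
              exact h2)
          simp only [List.length_set] at ihh ihms
          refine ⟨ihh, ?_⟩
          have hset : (heap.set pos (heap.getD c 0)).getD c 0 = heap.getD c 0 :=
            getD_set_ne _ (by omega) _
          rw [hset] at ihms
          have hms2 := multiset_set heap pos hlen (heap.getD c 0)
          have : heap.getD c 0 ::ₘ (heap.getD pos 0 ::ₘ
              ((pySiftupF n (heap.set pos (heap.getD c 0)) heap.length c newitem : List Int) : Multiset Int))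
              = heap.getD c 0 ::ₘ (newitem ::ₘ (heap : Multiset Int)) := by
            rw [Multiset.cons_swap, ihms, Multiset.cons_swap _ newitem, hms2,
              Multiset.cons_swap]
          exact (Multiset.cons_inj_right _).1 this
        by_cases hb : 2 * pos + 2 < heap.length ∧
            ¬ heap.getD (2 * pos + 1) 0 < heap.getD (2 * pos + 2) 0
        · simp only [if_pos hb]
          refine key (2 * pos + 2) (by omega) hb.1 (by omega) ?_
          intro o ho0 hopar holen
          have : o = 2 * pos + 1 ∨ o = 2 * pos + 2 := by omega
          rcases this with rfl | rfl
          · exact le_of_not_gt hb.2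
          · exact le_refl _
        · simp only [if_neg hb]
          refine key (2 * pos + 1) (by omega) hc (by omega) ?_
          intro o ho0 hopar holen
          have : o = 2 * pos + 1 ∨ o = 2 * pos + 2 := by omega
          rcases this with rfl | rfl
          · exact le_refl _
          · have : heap.getD (2 * pos + 1) 0 < heap.getD (2 * pos + 2) 0 := by
              by_contra hn2
              exact hb ⟨holen, hn2⟩
            exact le_of_lt this
      · simp only [if_neg hc]
        exact pySiftdown_spec pos heap newitem hlen inv1 inv2
          (fun j hj0 hjlen hq => by omega)
  unfold pySiftup
  exact aux heap.length pos heap newitem (by omega) hlen inv1 inv2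

theorem getD_append_left (l t : List Int) {j : Nat} (hj : j < l.length) :
    (l ++ t).getD j 0 = l.getD j 0 := by
  rw [List.getD_eq_getElem _ _ (by simp; omega), List.getD_eq_getElem _ _ hj,
    List.getElem_append_left hj]

theorem getD_append_self (l : List Int) (x : Int) : (l ++ [x]).getD l.length 0 = x := by
  rw [List.getD_eq_getElem _ _ (by simp), List.getElem_concat_length]
  rfl

theorem getD_dropLast (l : List Int) {j : Nat} (hj : j < l.dropLast.length) :
    l.dropLast.getD j 0 = l.getD j 0 := by
  rw [List.getD_eq_getElem _ _ hj,
    List.getD_eq_getElem _ _ (by simp at hj ⊢; omega), List.getElem_dropLast]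

theorem pyHeappush_spec (h : List Int) (x : Int) (hh : IsHeap h) :
    IsHeap (pyHeappush h x) ∧
      ((pyHeappush h x : List Int) : Multiset Int) = x ::ₘ (h : Multiset Int) := by
  unfold pyHeappush
  obtain ⟨hh2, hms⟩ := pySiftdown_spec h.length (h ++ [x]) x (by simp)
    (by
      intro j hj0 hjlen hj hq
      simp only [List.length_append, List.length_cons, List.length_nil] at hjlen
      have hjl : j < h.length := by omega
      rw [getD_append_left _ _ hjl, getD_append_left _ _ (by omega)]
      exact hh j hj0 hjl)
    (by intro j hj0 hjlen hq _; simp at hjlen; omega)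
    (by intro j hj0 hjlen hq; simp at hjlen; omega)
  refine ⟨hh2, ?_⟩
  rw [getD_append_self] at hms
  have := (Multiset.cons_inj_right x).1 hms
  rw [this]
  exact Multiset.coe_eq_coe.2 (List.perm_append_singleton x h)

theorem pyHeappop_spec (h : List Int) (hh : IsHeap h) (hne : h ≠ []) :
    (pyHeappop h).1 = h.getD 0 0 ∧ IsHeap (pyHeappop h).2 ∧
      (h.getD 0 0) ::ₘ (((pyHeappop h).2 : List Int) : Multiset Int) = (h : Multiset Int) := by
  have hlen0 : 0 < h.length := List.length_pos_of_ne_nil hne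
  simp only [pyHeappop]
  by_cases hre : h.dropLast.isEmpty
  · simp only [if_pos hre]
    have h1 : h.length = 1 := by
      have := List.isEmpty_iff.1 hre
      have := congrArg List.length this
      simp at this; omega
    obtain ⟨a, rfl⟩ := List.length_eq_one_iff.1 h1
    refine ⟨rfl, ?_, ?_⟩
    · intro j hj0 hjlen
      simp at hjlen
    · rfl
  · simp only [if_neg hre]
    have hrne : h.dropLast ≠ [] := fun hcontra => hre (by simp [hcontra])
    have hrlen : 0 < h.dropLast.length := List.length_pos_of_ne_nil hrne
    have hlen2 : 2 ≤ h.length := by simp at hrlen; omega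
    have hlast : h.getD (h.length - 1) 0 = h.getLast hne := by
      rw [List.getD_eq_getElem _ _ (by omega), List.getLast_eq_getElem]
    obtain ⟨hh2, hms⟩ := pySiftup_spec 0 (h.dropLast.set 0 (h.getD (h.length - 1) 0))
      (h.getD (h.length - 1) 0)
      (by simpa using hrlen)
      (by
        intro j hj0 hjlen hj hq
        simp only [List.length_set] at hjlen
        rw [getD_set_ne _ (by omega), getD_set_ne _ (by omega),
          getD_dropLast _ hjlen, getD_dropLast _ (by simp at hjlen ⊢; omega)]
        exact hh j hj0 (by simp at hjlen; omega))
      (by intro j _ _ _ hq0; omega)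
    simp only [List.length_set] at hh2 hms
    refine ⟨getD_dropLast _ hrlen, hh2, ?_⟩
    rw [getD_set_self _ hrlen] at hms
    have hres := (Multiset.cons_inj_right _).1 hms
    have hms2 := multiset_set h.dropLast 0 hrlen (h.getD (h.length - 1) 0)
    rw [getD_dropLast _ hrlen] at hms2
    rw [hres, hms2]
    have : (h.dropLast ++ [h.getLast hne] : List Int) = h := List.dropLast_append_getLast hne
    calc h.getD (h.length - 1) 0 ::ₘ ((h.dropLast : List Int) : Multiset Int)
        = ((h.dropLast ++ [h.getD (h.length - 1) 0] : List Int) : Multiset Int) :=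
          (Multiset.coe_eq_coe.2 (List.perm_append_singleton _ _)).symm
      _ = (h : Multiset Int) := by rw [hlast, this]


theorem pyInsort_spec (lst : List Int) (x : Int) (hs : lst.Pairwise (· ≤ ·)) :
    (pyInsort lst x).Pairwise (· ≤ ·) ∧
      ((pyInsort lst x : List Int) : Multiset Int) = x ::ₘ (lst : Multiset Int) := by
  obtain ⟨hle, hlo, hhi⟩ := PySem.List.bisectRight_spec lst x hs
  constructor
  · rw [pyInsort, List.pairwise_append]
    have hdrop : ∀ y ∈ lst.drop (PySem.List.bisectRight lst x), x ≤ y := by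
      intro y hy
      obtain ⟨k, hk, hky⟩ := List.getElem_of_mem hy
      rw [List.getElem_drop] at hky
      subst hky
      exact le_of_lt (hhi _ _ (by omega))
    have htake : ∀ a ∈ lst.take (PySem.List.bisectRight lst x), a ≤ x := by
      intro a ha
      obtain ⟨k, hk, hka⟩ := List.getElem_of_mem ha
      rw [List.getElem_take] at hka
      subst hka
      exact hlo _ _ (by simp at hk; omega)
    refine ⟨hs.sublist (List.take_sublist _ _), ?_, ?_⟩
    · rw [List.pairwise_cons]
      exact ⟨hdrop, hs.sublist (List.drop_sublist _ _)⟩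
    · intro a ha b hb
      rcases List.mem_cons.1 hb with rfl | hb'
      · exact htake a ha
      · exact le_trans (htake a ha) (le_trans (hdrop b hb') (le_refl _))
  · rw [pyInsort]
    calc ((lst.take (PySem.List.bisectRight lst x) ++ x :: lst.drop (PySem.List.bisectRight lst x) : List Int) : Multiset Int)
        = ((x :: (lst.take (PySem.List.bisectRight lst x) ++ lst.drop (PySem.List.bisectRight lst x)) : List Int) : Multiset Int) :=
          Multiset.coe_eq_coe.2 List.perm_middle
      _ = x ::ₘ (lst : Multiset Int) := by rw [List.take_append_drop]; rfl

-- the heap and the sorted list agree on the minimum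
theorem head_eq_root (h lst : List Int) (hh : IsHeap h) (hs : lst.Pairwise (· ≤ ·))
    (hm : (h : Multiset Int) = (lst : Multiset Int)) (hne : h ≠ []) :
    h.getD 0 0 = lst.getD 0 0 := by
  have hl0 : 0 < h.length := List.length_pos_of_ne_nil hne
  have hlne : lst ≠ [] := by
    intro hcontra
    rw [hcontra] at hm
    have h0 : ((h : List Int) : Multiset Int) = 0 := by simpa using hm
    exact hne (by simpa using h0)
  obtain ⟨b, t, rfl⟩ := List.exists_cons_of_ne_nil hlne
  have hmem : h.getD 0 0 ∈ b :: t := by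
    have : h.getD 0 0 ∈ h := by
      rw [List.getD_eq_getElem _ _ hl0]; exact List.getElem_mem _
    rw [← Multiset.mem_coe, hm] at this
    simpa using this
  have hble : ∀ z ∈ b :: t, b ≤ z := by
    intro z hz
    rcases List.mem_cons.1 hz with rfl | hz'
    · exact le_refl _
    · exact (List.pairwise_cons.1 hs).1 z hz'
  have hbmem : b ∈ h := by
    have : b ∈ ((b :: t : List Int) : Multiset Int) := by simp
    rw [← hm] at this
    simpa using this
  obtain ⟨j, hj, hjb⟩ := List.getElem_of_mem hbmem
  have hroot : h.getD 0 0 ≤ b := by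
    have := root_min h hh j hj
    rw [List.getD_eq_getElem _ _ hj, hjb] at this
    exact this
  have : (b :: t).getD 0 0 = b := rfl
  rw [this]
  exact le_antisymm hroot (hble _ hmem)

theorem loop_eq (K : Int) : ∀ n (heap lst : List Int) (cnt : Int), heap.length ≤ n →
    IsHeap heap → lst.Pairwise (· ≤ ·) → (heap : Multiset Int) = (lst : Multiset Int) →
    heap ≠ [] → solutionLoopF n K heap cnt = listLoopF n K lst cnt := by
  intro n
  induction n with
  | zero =>
    intro heap lst cnt hn hh hs hm hne
    rfl
  | succ n ihn =>
    intro heap lst cnt hn hh hs hm hne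
    have hlen_eq : heap.length = lst.length := by
      have := congrArg Multiset.card hm; simpa using this
    have hhead := head_eq_root heap lst hh hs hm hne
    simp only [solutionLoopF, listLoopF]
    rw [hhead, hlen_eq]
    by_cases hK : lst.getD 0 0 < K
    · simp only [if_pos hK]
      by_cases h1 : lst.length = 1
      · simp only [if_pos h1]
      · simp only [if_neg h1]
        have hlp : 0 < lst.length := by
          rw [← hlen_eq]; exact List.length_pos_of_ne_nil hne
        have hlen2 : 2 ≤ lst.length := by omega
        rcases lst with _ | ⟨x, _ | ⟨y, rest⟩⟩
        · simp at hlp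
        · simp at hlen2
        · obtain ⟨ha1, hh1, hm1⟩ := pyHeappop_spec heap hh hne
          have hx : heap.getD 0 0 = x := hhead
          have hm1' : (((pyHeappop heap).2 : List Int) : Multiset Int)
              = ((y :: rest : List Int) : Multiset Int) := by
            apply (Multiset.cons_inj_right x).1
            rw [hx] at hm1
            rw [hm1, hm, Multiset.cons_coe]
          have hne1 : (pyHeappop heap).2 ≠ [] := by
            apply List.ne_nil_of_length_pos
            rw [length_pyHeappop_snd]
            omega
          obtain ⟨ha2, hh2, hm2⟩ := pyHeappop_spec (pyHeappop heap).2 hh1 hne1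
          have hs' : (y :: rest).Pairwise (· ≤ ·) := (List.pairwise_cons.1 hs).2
          have hy : (pyHeappop heap).2.getD 0 0 = y :=
            head_eq_root _ _ hh1 hs' hm1' hne1
          have hm2' : (((pyHeappop (pyHeappop heap).2).2 : List Int) : Multiset Int)
              = ((rest : List Int) : Multiset Int) := by
            apply (Multiset.cons_inj_right y).1
            rw [hy] at hm2
            rw [hm2, hm1', Multiset.cons_coe]
          obtain ⟨hh3, hm3⟩ := pyHeappush_spec (pyHeappop (pyHeappop heap).2).2
            ((pyHeappop heap).1 + (pyHeappop (pyHeappop heap).2).1 * 2) hh2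
          obtain ⟨hsb, hmb⟩ := pyInsort_spec rest (x + 2 * y) (List.pairwise_cons.1 hs').2
          refine ihn _ _ _ ?_ hh3 ?_ ?_ ?_
          · rw [length_pyHeappush, length_pyHeappop_snd, length_pyHeappop_snd]
            simp only [List.length_cons] at hlen_eq ⊢
            omega
          · exact hsb
          · rw [hm3, hm2',
              show pyInsort (List.drop 2 (x :: y :: rest))
                  ((x :: y :: rest).getD 0 0 + 2 * (x :: y :: rest).getD 1 0)
                = pyInsort rest (x + 2 * y) from rfl, hmb, ha1, ha2, hx, hy]
            congr 1
            ring
          · apply List.ne_nil_of_length_pos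
            rw [length_pyHeappush]
            omega
    · simp only [if_neg hK]

theorem build_spec (scoville : List Int) :
    IsHeap (scoville.foldl (fun heap i => pyHeappush heap i) []) ∧
      ((scoville.foldl (fun heap i => pyHeappush heap i) [] : List Int) : Multiset Int)
        = (scoville : Multiset Int) := by
  have aux : ∀ (l acc : List Int), IsHeap acc →
      IsHeap (l.foldl (fun heap i => pyHeappush heap i) acc) ∧
        ((l.foldl (fun heap i => pyHeappush heap i) acc : List Int) : Multiset Int)
          = (acc : Multiset Int) + (l : Multiset Int) := by
    intro l
    induction l with
    | nil => intro acc hacc; exact ⟨hacc, by simp⟩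
    | cons i t ih =>
      intro acc hacc
      obtain ⟨h1, h2⟩ := pyHeappush_spec acc i hacc
      obtain ⟨h3, h4⟩ := ih (pyHeappush acc i) h1
      refine ⟨h3, ?_⟩
      rw [List.foldl_cons, h4, h2]
      simp only [← Multiset.cons_coe]
      rw [Multiset.cons_add]
      rw [Multiset.add_cons]
  obtain ⟨h1, h2⟩ := aux scoville [] (by intro j hj0 hjlen; simp at hjlen)
  exact ⟨h1, by rw [h2]; simp⟩

-- getD on a dropped list
theorem getD_drop (l : List Int) {i : Nat} (hi : i < l.length) :
    (l.drop i).getD 0 0 = l.getD i 0 := by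
  rw [List.getD_eq_getElem _ _ (by simpa using hi), List.getD_eq_getElem _ _ hi,
    List.getElem_drop]
  simp

theorem sorted_head_le (l : List Int) (hs : l.Pairwise (· ≤ ·)) :
    ∀ x ∈ l, l.getD 0 0 ≤ x := by
  rcases l with _ | ⟨h, t⟩
  · intro x hx; simp at hx
  · intro x hx
    rcases List.mem_cons.1 hx with rfl | hx'
    · exact le_refl _
    · exact (List.pairwise_cons.1 hs).1 x hx'

-- tqPeek is the minimum of the remaining multiset, and tqPop removes exactly it
theorem tqPop_spec (base made : List Int) (i : Nat) (hi : i ≤ base.length)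
    (hd : (base.drop i).Pairwise (· ≤ ·)) (hm : made.Pairwise (· ≤ ·))
    (hne : base.drop i ++ made ≠ []) :
    (tqPop base i made).1 = tqPeek base i made ∧
    tqPeek base i made ∈ base.drop i ++ made ∧
    (∀ x ∈ base.drop i ++ made, tqPeek base i made ≤ x) ∧
    (tqPop base i made).2.1 ≤ base.length ∧
    (base.drop (tqPop base i made).2.1).Pairwise (· ≤ ·) ∧
    (tqPop base i made).2.2.Pairwise (· ≤ ·) ∧
    ((base.drop i ++ made : List Int) : Multiset Int)
      = tqPeek base i made ::ₘ
        ((base.drop (tqPop base i made).2.1 ++ (tqPop base i made).2.2 : List Int) : Multiset Int) := by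
  by_cases hc : made ≠ [] ∧ (base.length ≤ i ∨ made.getD 0 0 ≤ base.getD i 0)
  · obtain ⟨m0, mt, rfl⟩ := List.exists_cons_of_ne_nil hc.1
    have hpeek : tqPeek base i (m0 :: mt) = m0 := by
      unfold tqPeek; rw [if_pos hc]; rfl
    have hpop : tqPop base i (m0 :: mt) = (m0, i, mt) := by
      unfold tqPop; rw [if_pos hc]; rfl
    have hmin : ∀ x ∈ base.drop i ++ m0 :: mt, m0 ≤ x := by
      intro x hx
      rcases List.mem_append.1 hx with hx' | hx'
      · have hdropne : base.drop i ≠ [] := List.ne_nil_of_mem hx'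
        have hilt : i < base.length := by
          by_contra hge
          exact hdropne (List.drop_eq_nil_of_le (by omega))
        have hle : m0 ≤ base.getD i 0 := by
          rcases hc.2 with hle' | hle'
          · omega
          · exact hle'
        rw [← getD_drop base hilt] at hle
        exact le_trans hle (sorted_head_le _ hd x hx')
      · exact sorted_head_le _ hm x hx'
    refine ⟨by rw [hpop, hpeek], by rw [hpeek]; exact List.mem_append.2 (Or.inr (by simp)),
      by rw [hpeek]; exact hmin, by rw [hpop]; exact hi, by rw [hpop]; exact hd,
      by rw [hpop]; exact (List.pairwise_cons.1 hm).2, ?_⟩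
    rw [hpeek, hpop]
    exact Multiset.coe_eq_coe.2 List.perm_middle
  · have hilt : i < base.length := by
      by_cases hmade : made = []
      · subst hmade
        simp only [List.append_nil] at hne
        by_contra hge
        exact hne (List.drop_eq_nil_of_le (by omega))
      · by_contra hge
        exact hc ⟨hmade, Or.inl (by omega)⟩
    have hpeek : tqPeek base i made = base.getD i 0 := by
      unfold tqPeek; rw [if_neg hc]
    have hpop : tqPop base i made = (base.getD i 0, i + 1, made) := by
      unfold tqPop; rw [if_neg hc]
    have hdrop_eq : base.drop i = base.getD i 0 :: base.drop (i + 1) := by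
      rw [List.getD_eq_getElem _ _ hilt]
      exact (List.getElem_cons_drop hilt).symm
    have hmin : ∀ x ∈ base.drop i ++ made, base.getD i 0 ≤ x := by
      intro x hx
      rcases List.mem_append.1 hx with hx' | hx'
      · have := sorted_head_le _ hd x hx'
        rwa [getD_drop base hilt] at this
      · have hmade : made ≠ [] := List.ne_nil_of_mem hx'
        have hlt : base.getD i 0 < made.getD 0 0 := by
          by_contra hge
          exact hc ⟨hmade, Or.inr (by omega)⟩
        exact le_of_lt (lt_of_lt_of_le hlt (sorted_head_le _ hm x hx'))
    refine ⟨by rw [hpop, hpeek],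
      by rw [hpeek]; exact List.mem_append.2 (Or.inl (by rw [hdrop_eq]; simp)),
      by rw [hpeek]; exact hmin, by rw [hpop]; show i + 1 ≤ base.length; omega,
      by rw [hpop]; rw [hdrop_eq] at hd; exact (List.pairwise_cons.1 hd).2,
      by rw [hpop]; exact hm, ?_⟩
    rw [hpeek, hpop, hdrop_eq]
    rfl

-- the head of the single sorted list equals tqPeek of a two-queue state with the same multiset
theorem head_eq_peek (base made lst : List Int) (i : Nat) (hi : i ≤ base.length)
    (hd : (base.drop i).Pairwise (· ≤ ·)) (hm : made.Pairwise (· ≤ ·))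
    (hs : lst.Pairwise (· ≤ ·))
    (hmul : (lst : Multiset Int) = ((base.drop i ++ made : List Int) : Multiset Int))
    (hne : lst ≠ []) :
    lst.getD 0 0 = tqPeek base i made := by
  have hdmne : base.drop i ++ made ≠ [] := by
    intro hcon
    rw [hcon] at hmul
    exact hne (by simpa using hmul)
  obtain ⟨-, hpmem, hpmin, -, -, -, -⟩ := tqPop_spec base made i hi hd hm hdmne
  have hl0 : 0 < lst.length := List.length_pos_of_ne_nil hne
  have hheadmem : lst.getD 0 0 ∈ base.drop i ++ made := by
    have : lst.getD 0 0 ∈ lst := by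
      rw [List.getD_eq_getElem _ _ hl0]; exact List.getElem_mem _
    rw [← Multiset.mem_coe, hmul] at this
    simpa using this
  have hpmem' : tqPeek base i made ∈ lst := by
    have : tqPeek base i made ∈ ((base.drop i ++ made : List Int) : Multiset Int) := by
      simpa using hpmem
    rw [← hmul] at this
    simpa using this
  exact le_antisymm (sorted_head_le _ hs _ hpmem') (hpmin _ hheadmem)

theorem tq_eq (K : Int) : ∀ fuel (base made lst : List Int) (i : Nat) (cnt : Int),
    i ≤ base.length → (base.drop i).Pairwise (· ≤ ·) → made.Pairwise (· ≤ ·) →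
    lst.Pairwise (· ≤ ·) →
    (lst : Multiset Int) = ((base.drop i ++ made : List Int) : Multiset Int) →
    lst ≠ [] → listLoopF fuel K lst cnt = solutionAltLoopF fuel K base i made cnt := by
  intro fuel
  induction fuel with
  | zero => intro base made lst i cnt _ _ _ _ _ _; rfl
  | succ fuel ih =>
    intro base made lst i cnt hi hd hm hs hmul hne
    have hdmne : base.drop i ++ made ≠ [] := by
      intro hcon
      rw [hcon] at hmul
      exact hne (by simpa using hmul)
    have hhead := head_eq_peek base made lst i hi hd hm hs hmul hne
    have hlen_eq : lst.length = base.length - i + made.length := by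
      have := congrArg Multiset.card hmul
      simp only [Multiset.coe_card, List.length_append, List.length_drop] at this
      omega
    simp only [listLoopF, solutionAltLoopF]
    by_cases hK : tqPeek base i made < K
    · rw [if_pos (show lst.getD 0 0 < K by rw [hhead]; exact hK), if_pos hK]
      by_cases h1 : base.length - i + made.length = 1
      · rw [if_pos (show lst.length = 1 by omega), if_pos h1]
      · rw [if_neg (show ¬ lst.length = 1 by omega), if_neg h1]
        have hlen2 : 2 ≤ lst.length := by
          have : 0 < lst.length := List.length_pos_of_ne_nil hne
          omega
        rcases lst with _ | ⟨x, _ | ⟨y, rest⟩⟩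
        · simp at hlen2
        · simp at hlen2
        · -- first pop
          obtain ⟨hp1, -, -, hi1, hd1, hm1, hms1⟩ := tqPop_spec base made i hi hd hm hdmne
          have hx : (x : Int) = tqPeek base i made := hhead
          have hmul1 : ((y :: rest : List Int) : Multiset Int)
              = ((base.drop (tqPop base i made).2.1 ++ (tqPop base i made).2.2 : List Int) : Multiset Int) := by
            apply (Multiset.cons_inj_right x).1
            rw [show (x ::ₘ ((y :: rest : List Int) : Multiset Int))
                = ((x :: y :: rest : List Int) : Multiset Int) from rfl, hmul, hms1, hx]
          have hdm1ne : base.drop (tqPop base i made).2.1 ++ (tqPop base i made).2.2 ≠ [] := by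
            intro hcon
            rw [hcon] at hmul1
            simp at hmul1
          -- second pop
          have hs' : (y :: rest).Pairwise (· ≤ ·) := (List.pairwise_cons.1 hs).2
          obtain ⟨hp2, -, -, hi2, hd2, hm2, hms2⟩ :=
            tqPop_spec base (tqPop base i made).2.2 (tqPop base i made).2.1 hi1 hd1 hm1 hdm1ne
          have hy : (y : Int) = tqPeek base (tqPop base i made).2.1 (tqPop base i made).2.2 :=
            head_eq_peek _ _ _ _ hi1 hd1 hm1 hs' hmul1 (by simp)
          have hmulr : ((rest : List Int) : Multiset Int)
              = ((base.drop (tqPop base (tqPop base i made).2.1 (tqPop base i made).2.2).2.1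
                  ++ (tqPop base (tqPop base i made).2.1 (tqPop base i made).2.2).2.2 : List Int) : Multiset Int) := by
            apply (Multiset.cons_inj_right y).1
            rw [show (y ::ₘ ((rest : List Int) : Multiset Int))
                = ((y :: rest : List Int) : Multiset Int) from rfl, hmul1, hms2, hy]
          obtain ⟨hsr, hmr⟩ := pyInsort_spec rest (x + 2 * y) (List.pairwise_cons.1 hs').2
          obtain ⟨hsm, hmm⟩ := pyInsort_spec
            (tqPop base (tqPop base i made).2.1 (tqPop base i made).2.2).2.2
            ((tqPop base i made).1 + 2 * (tqPop base (tqPop base i made).2.1 (tqPop base i made).2.2).1)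
            hm2
          have hv : (tqPop base i made).1
              + 2 * (tqPop base (tqPop base i made).2.1 (tqPop base i made).2.2).1
              = x + 2 * y := by
            rw [hp1, hp2, ← hx, ← hy]
          rw [show pyInsort (List.drop 2 (x :: y :: rest))
                ((x :: y :: rest).getD 0 0 + 2 * (x :: y :: rest).getD 1 0)
              = pyInsort rest (x + 2 * y) from rfl]
          refine ih base _ _ _ _ hi2 hd2 hsm hsr ?_ ?_
          · rw [hmr, hmulr, ← Multiset.coe_add, ← Multiset.coe_add, hmm, hv, Multiset.add_cons]
          · intro hcon
            have hlenr := congrArg Multiset.card hmr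
            rw [hcon] at hlenr
            simp at hlenr
    · rw [if_neg (show ¬ lst.getD 0 0 < K by rw [hhead]; exact hK), if_neg hK]

-- ===== VERDICT (by name: the statement is the Claim_ definition above) =====
theorem solution_spec : Claim_equal_solution := by
  intro scoville K _hdom hpre
  unfold Spec_solution solution solution_alt solutionLoop
  obtain ⟨hh, hms⟩ := build_spec scoville
  have hsorted_ms : ((PySem.List.sorted scoville (fun x => x) false : List Int) : Multiset Int)
      = (scoville : Multiset Int) :=
    (Multiset.coe_eq_coe).2 (PySem.List.sorted_perm scoville (fun x => x) false)
  have hmeq : ((scoville.foldl (fun heap i => pyHeappush heap i) [] : List Int) : Multiset Int)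
      = ((PySem.List.sorted scoville (fun x => x) false : List Int) : Multiset Int) := by
    rw [hms, hsorted_ms]
  have hne : scoville.foldl (fun heap i => pyHeappush heap i) [] ≠ [] := by
    intro hnil
    have h0 : ((scoville.foldl (fun heap i => pyHeappush heap i) [] : List Int) : Multiset Int) = 0 := by
      rw [hnil]; rfl
    rw [hms] at h0
    exact hpre (by simpa using h0)
  have hsortedp : (PySem.List.sorted scoville (fun x => x) false).Pairwise (· ≤ ·) := by
    simpa using PySem.List.sorted_pairwise scoville (fun x => x)
  have hsne : PySem.List.sorted scoville (fun x => x) false ≠ [] := by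
    intro hcon
    rw [hcon] at hsorted_ms
    exact hpre (by simpa using hsorted_ms.symm)
  have hlen1 : (scoville.foldl (fun heap i => pyHeappush heap i) []).length = scoville.length := by
    have := congrArg Multiset.card hms; simpa using this
  rw [hlen1]
  rw [loop_eq K scoville.length _ (PySem.List.sorted scoville (fun x => x) false) 0
    (by omega) hh hsortedp hmeq hne]
  exact tq_eq K scoville.length _ [] _ 0 0 (by omega) (by simpa using hsortedp)
    (by simp) hsortedp (by simp) hsne
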